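-- pv_equiv track=rewrite | github.com/anthony-maio/slipcore | src/slipcore/extensions.py | _estimate_coords
-- ===== SOURCE A (Python) =====
-- def _estimate_coords(canonical: str) -> tuple[int, ...]:
--     """
--     Estimate semantic coordinates from canonical text.
--     This is a simple heuristic - real implementations would use embeddings.
--     """
--     text_lower = canonical.lower()
--
--     # ACTION dimension (0-7)
--     action = 3  # default: request
--     if any(w in text_lower for w in ["observe", "see", "notice", "detect"]):
--         action = 0
--     elif any(w in text_lower for w in ["inform", "tell", "report", "update"]):
--         action = 1
--     elif any(w in text_lower for w in ["ask", "question", "what", "how", "why"]):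
--         action = 2
--     elif any(w in text_lower for w in ["request", "please", "need", "want"]):
--         action = 3
--     elif any(w in text_lower for w in ["propose", "suggest", "recommend"]):
--         action = 4
--     elif any(w in text_lower for w in ["commit", "will", "promise", "guarantee"]):
--         action = 5
--     elif any(w in text_lower for w in ["evaluate", "review", "assess", "check"]):
--         action = 6
--     elif any(w in text_lower for w in ["meta", "sync", "ack", "handoff"]):
--         action = 7
--
--     # POLARITY dimension (0-7)
--     polarity = 4  # neutral
--     if any(w in text_lower for w in ["no", "reject", "deny", "refuse", "fail"]):
--         polarity = 1
--     elif any(w in text_lower for w in ["yes", "accept", "approve", "good"]):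
--         polarity = 6
--
--     # DOMAIN dimension (0-7)
--     domain = 7  # general
--     if any(w in text_lower for w in ["task", "do", "execute", "implement"]):
--         domain = 0
--     elif any(w in text_lower for w in ["plan", "strategy", "approach"]):
--         domain = 1
--     elif any(w in text_lower for w in ["observe", "see", "state", "current"]):
--         domain = 2
--     elif any(w in text_lower for w in ["evaluate", "review", "quality"]):
--         domain = 3
--     elif any(w in text_lower for w in ["control", "meta", "system"]):
--         domain = 4
--     elif any(w in text_lower for w in ["resource", "memory", "cpu", "disk"]):
--         domain = 5
--     elif any(w in text_lower for w in ["error", "exception", "fail"]):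
--         domain = 6
--
--     # URGENCY dimension (0-7)
--     urgency = 4  # normal
--     if any(w in text_lower for w in ["critical", "urgent", "emergency", "asap"]):
--         urgency = 7
--     elif any(w in text_lower for w in ["important", "priority", "soon"]):
--         urgency = 5
--     elif any(w in text_lower for w in ["low", "background", "when possible"]):
--         urgency = 1
--
--     return (action, polarity, domain, urgency)
-- ===== SOURCE B (Python) =====
-- # B: exhaustive match collection + per-dimension argmin over global rule priorities,
-- # instead of A's four short-circuiting if/elif cascades.
-- _RULES = [
--     # (dimension, value, keywords); global list index = priority (lower wins)
--     (0, 0, ["observe", "see", "notice", "detect"]),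
--     (0, 1, ["inform", "tell", "report", "update"]),
--     (0, 2, ["ask", "question", "what", "how", "why"]),
--     (0, 3, ["request", "please", "need", "want"]),
--     (0, 4, ["propose", "suggest", "recommend"]),
--     (0, 5, ["commit", "will", "promise", "guarantee"]),
--     (0, 6, ["evaluate", "review", "assess", "check"]),
--     (0, 7, ["meta", "sync", "ack", "handoff"]),
--     (1, 1, ["no", "reject", "deny", "refuse", "fail"]),
--     (1, 6, ["yes", "accept", "approve", "good"]),
--     (2, 0, ["task", "do", "execute", "implement"]),
--     (2, 1, ["plan", "strategy", "approach"]),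
--     (2, 2, ["observe", "see", "state", "current"]),
--     (2, 3, ["evaluate", "review", "quality"]),
--     (2, 4, ["control", "meta", "system"]),
--     (2, 5, ["resource", "memory", "cpu", "disk"]),
--     (2, 6, ["error", "exception", "fail"]),
--     (3, 7, ["critical", "urgent", "emergency", "asap"]),
--     (3, 5, ["important", "priority", "soon"]),
--     (3, 1, ["low", "background", "when possible"]),
-- ]
-- _DEFAULTS = (3, 4, 7, 4)
--
--
-- def _estimate_coords(canonical: str) -> tuple[int, ...]:
--     """Collect every matching rule, then pick per dimension the one of highest priority."""
--     text_lower = canonical.lower()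
--     hits = [(dim, pri, val)
--             for pri, (dim, val, kws) in enumerate(_RULES)
--             if any(w in text_lower for w in kws)]
--     coords = []
--     for dim, default in enumerate(_DEFAULTS):
--         dim_hits = [(pri, val) for d, pri, val in hits if d == dim]
--         best = min(dim_hits, key=lambda h: h[0]) if dim_hits else None
--         coords.append(default if best is None else best[1])
--     return tuple(coords)
-- ===== Notes on version B (the rewrite author's own statement) =====
-- stated objective: alternative
-- what changed: Instead of A's four short-circuiting if/elif cascades, B flattens all rules into one global priority-indexed list, collects every matching rule exhaustively, and then selects per dimension the matching rule of minimal priority (Python min with key), falling back to the dimension's default when none matched.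
import Mathlib
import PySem

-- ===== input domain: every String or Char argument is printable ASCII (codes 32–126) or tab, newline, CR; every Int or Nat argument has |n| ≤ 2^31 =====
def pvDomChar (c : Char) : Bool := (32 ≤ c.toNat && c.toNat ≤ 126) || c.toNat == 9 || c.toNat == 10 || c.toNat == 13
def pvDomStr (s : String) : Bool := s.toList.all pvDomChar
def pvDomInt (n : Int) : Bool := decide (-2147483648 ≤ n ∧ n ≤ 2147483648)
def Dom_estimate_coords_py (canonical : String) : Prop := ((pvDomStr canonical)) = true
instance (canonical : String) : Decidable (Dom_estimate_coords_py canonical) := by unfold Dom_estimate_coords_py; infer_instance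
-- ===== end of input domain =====

-- B replaces A's four short-circuiting if/elif cascades by collecting ALL matching rules of a
-- flat global rule list and then selecting, per dimension, the match of minimal priority
-- (objective: alternative decomposition, same cost).

-- ===== PORT A =====
def estimate_coords_py (canonical : String) : List Int :=
  let text_lower := PySem.Str.lower canonical
  -- ACTION dimension (default: 3)
  let action : Int :=
    if (["observe", "see", "notice", "detect"]).any (fun w => PySem.Str.isIn w text_lower) then 0
    else if (["inform", "tell", "report", "update"]).any (fun w => PySem.Str.isIn w text_lower) then 1
    else if (["ask", "question", "what", "how", "why"]).any (fun w => PySem.Str.isIn w text_lower) then 2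
    else if (["request", "please", "need", "want"]).any (fun w => PySem.Str.isIn w text_lower) then 3
    else if (["propose", "suggest", "recommend"]).any (fun w => PySem.Str.isIn w text_lower) then 4
    else if (["commit", "will", "promise", "guarantee"]).any (fun w => PySem.Str.isIn w text_lower) then 5
    else if (["evaluate", "review", "assess", "check"]).any (fun w => PySem.Str.isIn w text_lower) then 6
    else if (["meta", "sync", "ack", "handoff"]).any (fun w => PySem.Str.isIn w text_lower) then 7
    else 3
  -- POLARITY dimension (default: 4)
  let polarity : Int :=
    if (["no", "reject", "deny", "refuse", "fail"]).any (fun w => PySem.Str.isIn w text_lower) then 1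
    else if (["yes", "accept", "approve", "good"]).any (fun w => PySem.Str.isIn w text_lower) then 6
    else 4
  -- DOMAIN dimension (default: 7)
  let domain : Int :=
    if (["task", "do", "execute", "implement"]).any (fun w => PySem.Str.isIn w text_lower) then 0
    else if (["plan", "strategy", "approach"]).any (fun w => PySem.Str.isIn w text_lower) then 1
    else if (["observe", "see", "state", "current"]).any (fun w => PySem.Str.isIn w text_lower) then 2
    else if (["evaluate", "review", "quality"]).any (fun w => PySem.Str.isIn w text_lower) then 3
    else if (["control", "meta", "system"]).any (fun w => PySem.Str.isIn w text_lower) then 4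
    else if (["resource", "memory", "cpu", "disk"]).any (fun w => PySem.Str.isIn w text_lower) then 5
    else if (["error", "exception", "fail"]).any (fun w => PySem.Str.isIn w text_lower) then 6
    else 7
  -- URGENCY dimension (default: 4)
  let urgency : Int :=
    if (["critical", "urgent", "emergency", "asap"]).any (fun w => PySem.Str.isIn w text_lower) then 7
    else if (["important", "priority", "soon"]).any (fun w => PySem.Str.isIn w text_lower) then 5
    else if (["low", "background", "when possible"]).any (fun w => PySem.Str.isIn w text_lower) then 1
    else 4
  [action, polarity, domain, urgency]

-- ===== PORT B =====
-- the flat global rule list: (dimension, value, keywords); list index = priority (lower wins)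
def pvRules : List (Int × Int × List String) :=
  [ (0, 0, ["observe", "see", "notice", "detect"]),
    (0, 1, ["inform", "tell", "report", "update"]),
    (0, 2, ["ask", "question", "what", "how", "why"]),
    (0, 3, ["request", "please", "need", "want"]),
    (0, 4, ["propose", "suggest", "recommend"]),
    (0, 5, ["commit", "will", "promise", "guarantee"]),
    (0, 6, ["evaluate", "review", "assess", "check"]),
    (0, 7, ["meta", "sync", "ack", "handoff"]),
    (1, 1, ["no", "reject", "deny", "refuse", "fail"]),
    (1, 6, ["yes", "accept", "approve", "good"]),
    (2, 0, ["task", "do", "execute", "implement"]),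
    (2, 1, ["plan", "strategy", "approach"]),
    (2, 2, ["observe", "see", "state", "current"]),
    (2, 3, ["evaluate", "review", "quality"]),
    (2, 4, ["control", "meta", "system"]),
    (2, 5, ["resource", "memory", "cpu", "disk"]),
    (2, 6, ["error", "exception", "fail"]),
    (3, 7, ["critical", "urgent", "emergency", "asap"]),
    (3, 5, ["important", "priority", "soon"]),
    (3, 1, ["low", "background", "when possible"]) ]

def pvDefaults : List Int := [3, 4, 7, 4]

def estimate_coords_py_alt (canonical : String) : List Int :=
  let text_lower := PySem.Str.lower canonical
  -- hits = [(dim, pri, val) for pri, (dim, val, kws) in enumerate(_RULES) if any(w in text_lower for w in kws)]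
  let hits : List (Int × Int × Int) :=
    (PySem.List.enumerate pvRules).filterMap
      (fun pe => if pe.2.2.2.any (fun w => PySem.Str.isIn w text_lower)
                 then some (pe.2.1, pe.1, pe.2.2.1) else none)
  (PySem.List.enumerate pvDefaults).map (fun de =>
    let dimHits : List (Int × Int) :=
      hits.filterMap (fun h => if h.1 = de.1 then some (h.2.1, h.2.2) else none)
    -- best = min(dim_hits, key=lambda h: h[0]) if dim_hits else None  (min? is Python's first-minimum, none iff empty)
    match PySem.List.min? dimHits (fun h => h.1) with
    | some best => best.2
    | none => de.2)

-- ===== PRECONDITION & SPEC =====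
def Spec_estimate_coords_py (canonical : String) (out : List Int) : Prop := out = estimate_coords_py_alt canonical
instance (canonical : String) (out : List Int) : Decidable (Spec_estimate_coords_py canonical out) := by unfold Spec_estimate_coords_py; infer_instance

-- ===== CLAIM (what is proved, stated in full; the proofs are below) =====
def Claim_equal_estimate_coords_py : Prop := ∀ (canonical : String), Dom_estimate_coords_py canonical → Spec_estimate_coords_py canonical (estimate_coords_py canonical)

-- ===== LEMMAS AND PROOFS =====

-- the hits of the rules list enumerated from start s
def pvHits (t : String) (s : Int) (rules : List (Int × Int × List String)) : List (Int × Int × Int) :=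
  (PySem.List.enumerate rules s).filterMap
    (fun pe => if pe.2.2.2.any (fun w => PySem.Str.isIn w t)
               then some (pe.2.1, pe.1, pe.2.2.1) else none)

-- first-match reading of one dimension (what A's cascade computes over the rules of that dimension)
def pvFirst (t : String) (dim default : Int) : List (Int × Int × List String) → Int
  | [] => default
  | r :: rest =>
      if r.1 = dim ∧ r.2.2.any (fun w => PySem.Str.isIn w t) then r.2.1
      else pvFirst t dim default rest

lemma pvHits_nil (t : String) (s : Int) : pvHits t s [] = [] := rfl

lemma pvHits_cons (t : String) (s : Int) (r : Int × Int × List String)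
    (rest : List (Int × Int × List String)) :
    pvHits t s (r :: rest) =
      (if r.2.2.any (fun w => PySem.Str.isIn w t)
       then [(r.1, s, r.2.1)] else []) ++ pvHits t (s + 1) rest := by
  simp only [pvHits, PySem.List.enumerate_cons, List.filterMap_cons]
  by_cases hb : (r.2.2.any fun w => PySem.Str.isIn w t) = true
  · rw [if_pos hb, if_pos hb]; rfl
  · rw [if_neg hb, if_neg hb]; rfl

lemma pvHits_pri_ge (t : String) (s : Int) (rules : List (Int × Int × List String))
    {h : Int × Int × Int} (hm : h ∈ pvHits t s rules) : s ≤ h.2.1 := by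
  unfold pvHits at hm
  rcases List.mem_filterMap.mp hm with ⟨pe, hpe, hfe⟩
  rcases (PySem.List.mem_enumerate_iff _ _ _).mp hpe with ⟨k, hk, rfl⟩
  split at hfe
  · cases hfe; simp
  · cases hfe

lemma min?_foldl_keep {α : Type} (key : α → Int) (m : α) (l : List α)
    (h : ∀ y ∈ l, ¬ key y < key m) :
    List.foldl (fun acc x => match acc with
        | none => some x
        | some m' => if key x < key m' then some x else some m') (some m) l = some m := by
  induction l with
  | nil => rfl
  | cons a l ih =>
      simp only [List.foldl_cons]
      rw [if_neg (h a (by simp))]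
      exact ih (fun y hy => h y (by simp [hy]))

lemma min?_cons_first {α : Type} (key : α → Int) (m : α) (l : List α)
    (h : ∀ y ∈ l, ¬ key y < key m) :
    PySem.List.min? (m :: l) key = some m := by
  simp only [PySem.List.min?, List.foldl_cons]
  exact min?_foldl_keep key m l h

-- splitting off the head rule from the per-dimension hit list
lemma pvHits_dim_cons (t : String) (s dim : Int) (r : Int × Int × List String)
    (rest : List (Int × Int × List String)) :
    ((pvHits t s (r :: rest)).filterMap
          (fun h => if h.1 = dim then some (h.2.1, h.2.2) else none)) =
        (if r.1 = dim ∧ (r.2.2.any (fun w => PySem.Str.isIn w t)) = true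
         then [((s : Int), r.2.1)] else []) ++
        ((pvHits t (s + 1) rest).filterMap
          (fun h => if h.1 = dim then some (h.2.1, h.2.2) else none)) := by
  rw [pvHits_cons]
  by_cases hb : (r.2.2.any fun w => PySem.Str.isIn w t) = true
  · rw [if_pos hb, List.filterMap_append, List.filterMap_cons, List.filterMap_nil]
    by_cases hd : r.1 = dim
    · rw [if_pos hd, if_pos ⟨hd, hb⟩]
    · rw [if_neg hd, if_neg (fun hc => hd hc.1)]
  · rw [if_neg hb, if_neg (fun hc => hb hc.2)]; simp only [List.nil_append]

-- the per-dimension pick of B equals the first-match reading of that dimension's rules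
lemma pick_eq_first (t : String) (dim default : Int)
    (rules : List (Int × Int × List String)) (s : Int) :
    (match PySem.List.min?
        ((pvHits t s rules).filterMap
          (fun h => if h.1 = dim then some (h.2.1, h.2.2) else none))
        (fun h => h.1) with
     | some best => best.2
     | none => default) = pvFirst t dim default rules := by
  induction rules generalizing s with
  | nil => simp [pvHits_nil, pvFirst, PySem.List.min?]
  | cons r rest ih =>
      rw [pvHits_dim_cons]
      by_cases hc : r.1 = dim ∧ (r.2.2.any (fun w => PySem.Str.isIn w t)) = true
      · rw [if_pos hc, List.singleton_append]
        have hkeys : ∀ y ∈ (pvHits t (s + 1) rest).filterMap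
            (fun h => if h.1 = dim then some (h.2.1, h.2.2) else none),
            ¬ (fun (h : Int × Int) => h.1) y < (fun (h : Int × Int) => h.1) ((s : Int), r.2.1) := by
          intro y hy
          rcases List.mem_filterMap.mp hy with ⟨h, hh, hf⟩
          have hge := pvHits_pri_ge t (s + 1) rest hh
          split at hf
          · cases hf; simp; omega
          · cases hf
        rw [min?_cons_first (fun (h : Int × Int) => h.1) _ _ hkeys]
        conv_rhs => rw [pvFirst]
        rw [if_pos hc]
      · rw [if_neg hc, List.nil_append, ih (s + 1)]
        conv_rhs => rw [pvFirst]
        rw [if_neg hc]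

-- ===== VERDICT (by name: the statement is the Claim_ definition above) =====
theorem estimate_coords_py_spec : Claim_equal_estimate_coords_py := by
  intro canonical _
  unfold Spec_estimate_coords_py estimate_coords_py estimate_coords_py_alt
  have hpick := fun dim default s =>
    pick_eq_first (PySem.Str.lower canonical) dim default pvRules s
  simp only [pvDefaults, PySem.List.enumerate_cons, PySem.List.enumerate_nil, List.map_cons,
    List.map_nil]
  rw [show (PySem.List.enumerate pvRules 0).filterMap
        (fun pe => if pe.2.2.2.any (fun w => PySem.Str.isIn w (PySem.Str.lower canonical))
                   then some (pe.2.1, pe.1, pe.2.2.1) else none) =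
      pvHits (PySem.Str.lower canonical) 0 pvRules from rfl]
  rw [hpick 0 3 0, hpick (0+1) 4 0, hpick (0+1+1) 7 0, hpick (0+1+1+1) 4 0]
  simp [pvFirst, pvRules]
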